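-- pv_equiv track=rewrite | github.com/hqyang/BertTest | src/preprocess.py | check_english_words
-- ===== SOURCE A (Python) =====
-- def is_english_char(cp):
--     """Checks whether CP is an English character."""
--     # https://zh.wikipedia.org/wiki/%E5%85%A8%E5%BD%A2%E5%92%8C%E5%8D%8A%E5%BD%A2
--     if ((cp >= 0x0041 and cp <= 0x005A) or
--         (cp >= 0x0061 and cp <= 0x007A) or
--         (cp >= 0xFF21 and cp <= 0xFF3A) or
--         (cp >= 0xFF41 and cp <= 0xFF5A)):
--         return True
--
--     return False
--
-- def check_english_words(word):
--     word = word.lower()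
--     if '[unk]' in word or '[unused' in word: # detecting unknown token
--         return True
--
--     for idx in range(len(word)):
--         if not is_english_char(ord(word[idx])):
--             return False # one char is not English, it is not an English word
--     return True
-- ===== SOURCE B (Python) =====
-- import re
--
-- # The per-character loop and the is_english_char range helper are replaced by a
-- # single precompiled regular expression: a character class covering the same
-- # four codepoint ranges, applied once with fullmatch ('*' matches the empty word).
-- _ENGLISH_RE = re.compile(r'[A-Za-z\uFF21-\uFF3A\uFF41-\uFF5A]*')
--
-- def check_english_words(word):
--     word = word.lower()
--     if '[unk]' in word or '[unused' in word:  # detecting unknown token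
--         return True
--     return _ENGLISH_RE.fullmatch(word) is not None
-- ===== Notes on version B (the rewrite author's own statement) =====
-- stated objective: faster
-- what changed: The explicit per-character Python loop with the is_english_char range-test helper is replaced by one precompiled regular expression (a character class over the same four codepoint ranges) matched against the whole word with fullmatch, so the scan runs inside the regex engine.
import Mathlib
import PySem

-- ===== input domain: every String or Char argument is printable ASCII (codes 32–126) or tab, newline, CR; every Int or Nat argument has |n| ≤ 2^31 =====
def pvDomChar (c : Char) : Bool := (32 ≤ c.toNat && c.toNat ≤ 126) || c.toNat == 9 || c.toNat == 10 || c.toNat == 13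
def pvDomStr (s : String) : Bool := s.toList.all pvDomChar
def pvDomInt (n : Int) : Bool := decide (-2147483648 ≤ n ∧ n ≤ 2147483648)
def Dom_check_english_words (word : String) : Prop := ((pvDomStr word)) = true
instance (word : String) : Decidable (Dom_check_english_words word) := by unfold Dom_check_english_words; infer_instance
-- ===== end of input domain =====

-- B keeps A's special-token guard but replaces the explicit per-character loop and
-- range-test helper by one precompiled regex character class applied with fullmatch.

-- ===== PORT A =====
-- cp is the code point (Python ord); Nat since ord of a char is always ≥ 0
def is_english_char (cp : Nat) : Bool :=
  if ((0x0041 ≤ cp && cp ≤ 0x005A) ||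
      (0x0061 ≤ cp && cp ≤ 0x007A) ||
      (0xFF21 ≤ cp && cp ≤ 0xFF3A) ||
      (0xFF41 ≤ cp && cp ≤ 0xFF5A)) then true
  else false

-- 'for idx in range(len(word)): if not is_english_char(ord(word[idx])): return False'
def checkLoop : List Char → Bool
  | [] => true
  | c :: rest => if !(is_english_char c.toNat) then false else checkLoop rest

def check_english_words (word : String) : Bool :=
  let w := PySem.Str.lower word
  if PySem.Str.isIn "[unk]" w || PySem.Str.isIn "[unused" w then true
  else checkLoop w.toList

-- ===== PORT B =====
-- membership in the regex character class [A-Za-z\uFF21-\uFF3A\uFF41-\uFF5A]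
def englishClass (c : Char) : Bool :=
  ('A' ≤ c && c ≤ 'Z') || ('a' ≤ c && c ≤ 'z') ||
  ('\uFF21' ≤ c && c ≤ '\uFF3A') || ('\uFF41' ≤ c && c ≤ '\uFF5A')

-- re.fullmatch of the pattern '[class]*': exact semantics for this pattern —
-- it returns a match object iff every character of the string is in the class
-- (the empty string matches, '*' taking zero repetitions).
def reFullmatchClassStar (cls : Char → Bool) (s : String) : Option String :=
  if s.toList.all cls then some s else none

def check_english_words_alt (word : String) : Bool :=
  let w := PySem.Str.lower word
  if PySem.Str.isIn "[unk]" w || PySem.Str.isIn "[unused" w then true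
  else (reFullmatchClassStar englishClass w).isSome

-- ===== PRECONDITION & SPEC =====
def Spec_check_english_words (word : String) (out : Bool) : Prop := out = check_english_words_alt word
instance (word : String) (out : Bool) : Decidable (Spec_check_english_words word out) := by unfold Spec_check_english_words; infer_instance

-- ===== CLAIM =====
def Claim_equal_check_english_words : Prop := ∀ (word : String), Dom_check_english_words word → Spec_check_english_words word (check_english_words word)

-- ===== LEMMAS AND PROOFS =====
lemma class_eq (c : Char) : englishClass c = is_english_char c.toNat := by
  have hc : c.val.toNat = c.toNat := rfl
  rw [Bool.eq_iff_iff]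
  unfold is_english_char
  split <;> rename_i hcond <;>
    simp only [Bool.or_eq_true, Bool.and_eq_true, decide_eq_true_eq] at hcond <;>
    simp [englishClass, Char.le_def, UInt32.le_iff_toNat_le, hc] <;>
    omega

lemma checkLoop_eq_all (l : List Char) :
    checkLoop l = l.all (fun c => is_english_char c.toNat) := by
  induction l with
  | nil => rfl
  | cons c rest ih =>
    simp only [checkLoop, List.all_cons, ih]
    by_cases h : is_english_char c.toNat <;> simp [h]

-- ===== VERDICT =====
theorem check_english_words_spec : Claim_equal_check_english_words := by
  intro word _
  unfold Spec_check_english_words check_english_words check_english_words_alt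
  set w := PySem.Str.lower word
  by_cases hguard : (PySem.Str.isIn "[unk]" w || PySem.Str.isIn "[unused" w) = true
  · rw [if_pos hguard, if_pos hguard]
  · rw [if_neg hguard, if_neg hguard, checkLoop_eq_all, reFullmatchClassStar]
    by_cases hall : w.toList.all englishClass
    · rw [if_pos hall]
      simp only [Option.isSome_some]
      rw [List.all_eq_true] at hall ⊢
      intro c hc; rw [← class_eq]; exact hall c hc
    · rw [if_neg hall]
      simp only [Option.isSome_none]
      rw [Bool.eq_false_iff]
      intro hcon; apply hall
      rw [List.all_eq_true] at hcon ⊢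
      intro c hc; rw [class_eq]; exact hcon c hc
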